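-- pv_equiv track=rewrite | github.com/amitkhotele/GeeksforGeeks-POTD | July 2025 Solutions/July-11.py | countConsec
-- ===== SOURCE A (Python) =====
-- def countConsec(n: int) -> int:
--     # Arrays to store number of valid strings ending in 0 and 1
--     a = [0] * (n + 1)
--     b = [0] * (n + 1)
--
--     # Base cases
--     a[1] = 1
--     b[1] = 1
--
--     for i in range(2, n + 1):
--         a[i] = a[i - 1] + b[i - 1]
--         b[i] = a[i - 1]
--
--     good = a[n] + b[n]
--     total = 2 ** n
--     bad = total - good
--
--     return bad
-- ===== SOURCE B (Python) =====
-- def countConsec(n: int) -> int: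
--     # bad = 2^n - F(n+2), computed with fast-doubling Fibonacci: O(log n) multiplications.
--     def fd(k):
--         # returns (F(k), F(k+1))
--         if k == 0:
--             return (0, 1)
--         a, b = fd(k >> 1)
--         c = a * (2 * b - a)
--         d = a * a + b * b
--         if k & 1:
--             return (d, c + d)
--         return (c, d)
--     return (1 << n) - fd(n + 2)[0]
-- ===== Notes on version B (the rewrite author's own statement) =====
-- stated objective: faster
-- what changed: Replaces the O(n) DP over two length-(n+1) arrays with the closed form bad = 2^n - F(n+2) evaluated by fast-doubling Fibonacci (O(log n) multiplications) and a single shift for 2^n.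
import Mathlib
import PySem

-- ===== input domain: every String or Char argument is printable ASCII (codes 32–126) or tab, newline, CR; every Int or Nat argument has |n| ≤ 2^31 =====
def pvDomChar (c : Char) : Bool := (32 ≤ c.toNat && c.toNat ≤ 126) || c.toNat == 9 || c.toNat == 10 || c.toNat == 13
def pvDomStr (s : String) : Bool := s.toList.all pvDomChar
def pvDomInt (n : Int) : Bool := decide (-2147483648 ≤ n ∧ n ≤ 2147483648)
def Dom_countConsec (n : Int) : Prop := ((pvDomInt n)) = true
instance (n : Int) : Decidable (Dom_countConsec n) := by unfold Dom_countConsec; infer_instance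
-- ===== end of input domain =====

-- B replaces A's linear two-array DP by the closed form 2^n - F(n+2) via fast-doubling Fibonacci; return value only.


-- ===== PORT A =====
-- Python lists a, b are ported as Array Int (O(1) random access, like Python's lists).
-- Indices: every index A uses (1, i, i-1 for i in range(2, n+1), and n at the end) is ≥ 0 whenever
-- it is in range, so plain Nat indexing via .toNat with getD/setIfInBounds is exact here; the
-- out-of-range cases (n ≤ 0, where Python raises IndexError) are excluded by Pre_.
def countConsec (n : Int) : Int :=
  let a0 : Array Int := Array.replicate (n + 1).toNat 0   -- a = [0] * (n + 1)
  let b0 : Array Int := Array.replicate (n + 1).toNat 0   -- b = [0] * (n + 1)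
  let a1 := a0.setIfInBounds 1 1                          -- a[1] = 1  (in range under Pre_)
  let b1 := b0.setIfInBounds 1 1                          -- b[1] = 1
  let st := (PySem.List.pyRange 2 (n + 1) 1).foldl        -- for i in range(2, n + 1):
    (fun (st : Array Int × Array Int) i =>
      match st with
      | (a, b) =>
        let av := a.getD (i - 1).toNat 0                  --   a[i - 1]
        let bv := b.getD (i - 1).toNat 0                  --   b[i - 1]
        (a.setIfInBounds i.toNat (av + bv), b.setIfInBounds i.toNat av)) (a1, b1)
  let good := st.1.getD n.toNat 0 + st.2.getD n.toNat 0   -- good = a[n] + b[n]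
  let total := (2 : Int) ^ n.toNat                        -- total = 2 ** n  (n ≥ 1 under Pre_)
  total - good                                            -- bad = total - good

-- ===== PORT B =====
-- fast doubling: fastFib k = (F(k), F(k+1))
def fastFib (k : Nat) : Int × Int :=
  if h : k = 0 then (0, 1)
  else
    let p := fastFib (k / 2)
    let a := p.1
    let b := p.2
    let c := a * (2 * b - a)
    let d := a * a + b * b
    if k % 2 = 1 then (d, c + d) else (c, d)
decreasing_by exact Nat.div_lt_self (Nat.pos_of_ne_zero h) (by omega)

def countConsec_alt (n : Int) : Int :=
  (2 : Int) ^ n.toNat - (fastFib (n + 2).toNat).1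

-- ===== PRECONDITION & SPEC =====
-- Pre_ excludes n ≤ 0, where A raises IndexError at 'a[1] = 1' (the arrays have length ≤ 1).
def Pre_countConsec (n : Int) : Prop := 1 ≤ n
instance (n : Int) : Decidable (Pre_countConsec n) := by unfold Pre_countConsec; infer_instance
def pvWitness_countConsec : Int := 3

def Spec_countConsec (n : Int) (out : Int) : Prop := out = countConsec_alt n
instance (n : Int) (out : Int) : Decidable (Spec_countConsec n out) := by unfold Spec_countConsec; infer_instance

-- ===== CLAIM (what is proved, stated in full; the proofs are below) =====
def Claim_equal_countConsec : Prop := ∀ (n : Int), Dom_countConsec n → Pre_countConsec n → Spec_countConsec n (countConsec n)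

-- ===== LEMMAS AND PROOFS =====

theorem fib_cast_two_mul (m : Nat) :
    ((Nat.fib (2 * m) : Int)) = (Nat.fib m : Int) * (2 * Nat.fib (m + 1) - Nat.fib m) := by
  have hle : Nat.fib m ≤ 2 * Nat.fib (m + 1) := le_trans Nat.fib_le_fib_succ (by omega)
  rw [Nat.fib_two_mul]; push_cast [hle]; ring

theorem fib_cast_two_mul_add_one (m : Nat) :
    ((Nat.fib (2 * m + 1) : Int)) = (Nat.fib m : Int) * Nat.fib m + (Nat.fib (m + 1) : Int) * Nat.fib (m + 1) := by
  rw [Nat.fib_two_mul_add_one]; push_cast; ring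

theorem fastFib_eq (k : Nat) : fastFib k = ((Nat.fib k : Int), (Nat.fib (k + 1) : Int)) := by
  induction k using Nat.strong_induction_on with
  | _ k ih =>
    by_cases h : k = 0
    · subst h; simp [fastFib]
    · have ihm := ih (k / 2) (Nat.div_lt_self (Nat.pos_of_ne_zero h) (by omega))
      rw [fastFib, dif_neg h]
      simp only [ihm]
      have h2 : k % 2 = 1 ∨ k % 2 = 0 := by omega
      rcases h2 with h2 | h2
      · rw [if_pos h2, Prod.mk.injEq]
        have hk : k = 2 * (k / 2) + 1 := by omega
        have hk1 : k + 1 = 2 * (k / 2) + 1 + 1 := by omega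
        refine ⟨?_, ?_⟩
        · conv_rhs => rw [hk]
          rw [fib_cast_two_mul_add_one]
        · conv_rhs => rw [hk1]
          rw [Nat.fib_add_two]
          push_cast
          rw [fib_cast_two_mul, fib_cast_two_mul_add_one]
      · rw [if_neg (by omega), Prod.mk.injEq]
        have hk : k = 2 * (k / 2) := by omega
        have hk1 : k + 1 = 2 * (k / 2) + 1 := by omega
        refine ⟨?_, ?_⟩
        · conv_rhs => rw [hk]
          rw [fib_cast_two_mul]
        · conv_rhs => rw [hk1]
          rw [fib_cast_two_mul_add_one]

theorem arr_getD_of_get? (a : Array Int) (m : Nat) (x : Int) (h : a[m]? = some x) :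
    a.getD m 0 = x := by
  rcases Array.getElem?_eq_some_iff.mp h with ⟨hlt, rfl⟩
  simp [Array.getD, hlt]

-- loop invariant for A's fold over range(2, m+1)
theorem loop_inv (L : Nat) (m : Nat) (hm : 1 ≤ m) (hmL : m < L)
    (a b : Array Int) (ha : a.size = L) (hb : b.size = L)
    (hA : a[1]? = some 1) (hB : b[1]? = some 1) :
    ∃ A B : Array Int, (PySem.List.pyRange 2 ((m : Int) + 1) 1).foldl
      (fun (st : Array Int × Array Int) i =>
        match st with
        | (a, b) =>
          let av := a.getD (i - 1).toNat 0
          let bv := b.getD (i - 1).toNat 0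
          (a.setIfInBounds i.toNat (av + bv), b.setIfInBounds i.toNat av)) (a, b) = (A, B) ∧
      A.size = L ∧ B.size = L ∧
      A[m]? = some (Nat.fib (m + 1) : Int) ∧ B[m]? = some (Nat.fib m : Int) := by
  induction m with
  | zero => omega
  | succ m ihm =>
    by_cases hm1 : m = 0
    · subst hm1
      refine ⟨a, b, ?_, ha, hb, ?_, ?_⟩
      · rw [PySem.List.pyRange_one_eq_nil (by norm_num)]
        rfl
      · simpa using hA
      · simpa using hB
    · obtain ⟨A, B, hfold, hAl, hBl, hAm, hBm⟩ :=
        ihm (by omega) (by omega)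
      have hsplit : PySem.List.pyRange 2 ((↑(m + 1) : Int) + 1) 1
          = PySem.List.pyRange 2 ((m : Int) + 1) 1 ++ [(m : Int) + 1] := by
        have := PySem.List.pyRange_one_succ_right (a := 2) (b := (m : Int) + 1) (by omega)
        push_cast
        convert this using 2
      rw [hsplit, List.foldl_append, hfold]
      simp only [List.foldl_cons, List.foldl_nil]
      have hidx : (((m : Int) + 1 - 1)).toNat = m := by omega
      have hget1 : A.getD (((m : Int) + 1 - 1)).toNat 0 = (Nat.fib (m + 1) : Int) := by
        rw [hidx]; exact arr_getD_of_get? A m _ hAm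
      have hget2 : B.getD (((m : Int) + 1 - 1)).toNat 0 = (Nat.fib m : Int) := by
        rw [hidx]; exact arr_getD_of_get? B m _ hBm
      have htoNat : ((m : Int) + 1).toNat = m + 1 := by omega
      refine ⟨_, _, rfl, ?_, ?_, ?_, ?_⟩
      · simp [hAl]
      · simp [hBl]
      · simp only [hget1, hget2, htoNat]
        simp [Array.getElem?_setIfInBounds, show m + 1 < A.size from by omega, Nat.fib_add_two]
        push_cast; ring
      · simp only [hget1, htoNat]
        simp [Array.getElem?_setIfInBounds, show m + 1 < B.size from by omega]

-- ===== VERDICT (by name: the statement is the Claim_ definition above) =====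
theorem countConsec_spec : Claim_equal_countConsec := by
  intro n _ hpre
  have hpre' : (1 : Int) ≤ n := hpre
  set m := n.toNat with hmdef
  have hn : n = (m : Int) := by omega
  have hm1 : 1 ≤ m := by omega
  have hLm : ((m : Int) + 1).toNat = m + 1 := by omega
  have hset : ((Array.replicate ((m : Int) + 1).toNat (0 : Int)).setIfInBounds 1 1)[1]? = some 1 := by
    rw [Array.getElem?_setIfInBounds]
    simp [hLm]
    omega
  obtain ⟨A, B, hfold, hAl, hBl, hAm, hBm⟩ :=
    loop_inv (m + 1) m hm1 (by omega)
      ((Array.replicate ((m : Int) + 1).toNat (0:Int)).setIfInBounds 1 1)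
      ((Array.replicate ((m : Int) + 1).toNat (0:Int)).setIfInBounds 1 1)
      (by simp [hLm]) (by simp [hLm]) hset hset
  have hrange : n + 1 = (m : Int) + 1 := by omega
  unfold Spec_countConsec countConsec countConsec_alt
  simp only [hrange, hfold]
  have hgA : A.getD n.toNat 0 = (Nat.fib (m + 1) : Int) := arr_getD_of_get? A m _ hAm
  have hgB : B.getD n.toNat 0 = (Nat.fib m : Int) := arr_getD_of_get? B m _ hBm
  have hfib : (fastFib (n + 2).toNat).1 = (Nat.fib (m + 2) : Int) := by
    rw [show (n + 2).toNat = m + 2 from by omega, fastFib_eq]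
  rw [hgA, hgB, hfib, Nat.fib_add_two]
  push_cast
  ring
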